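-- pv_equiv track=rewrite | github.com/wojciech-gancza/typo | typo/typo_cpp_generator.py | _generate_single_char_map
-- ===== SOURCE A (Python) =====
-- def _generate_single_char_map(values, char_position):
--     result_map = { }
--     for value in values:
--         char = value[char_position]
--         if char in result_map.keys():
--             result_map[char].append(value)
--         else:
--             result_map[char] = [ value ]
--     return result_map
-- ===== SOURCE B (Python) =====
-- def _generate_single_char_map(values, char_position):
--     keys = list(dict.fromkeys(value[char_position] for value in values))
--     return {k: [value for value in values if value[char_position] == k] for k in keys}
-- ===== Notes on version B (the rewrite author's own statement) =====
-- stated objective: alternative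
-- what changed: The single accumulating dict-append pass is replaced by a two-phase strategy: first collect the distinct key chars in order of first occurrence (dict.fromkeys), then build each group with a per-key filter over the values.
import Mathlib
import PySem

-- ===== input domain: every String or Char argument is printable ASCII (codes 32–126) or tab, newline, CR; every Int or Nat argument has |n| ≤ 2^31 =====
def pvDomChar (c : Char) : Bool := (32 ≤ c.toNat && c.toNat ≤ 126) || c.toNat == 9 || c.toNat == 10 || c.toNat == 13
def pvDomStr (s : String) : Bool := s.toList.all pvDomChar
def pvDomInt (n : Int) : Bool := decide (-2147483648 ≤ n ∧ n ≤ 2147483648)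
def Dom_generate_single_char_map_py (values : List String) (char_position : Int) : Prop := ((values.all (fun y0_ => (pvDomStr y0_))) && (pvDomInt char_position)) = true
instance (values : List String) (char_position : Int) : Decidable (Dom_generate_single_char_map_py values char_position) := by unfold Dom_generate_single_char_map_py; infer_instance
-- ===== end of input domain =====

-- B replaces A's single accumulating pass by an ordered-dedup of keys followed by a per-key filter (alternative decomposition, not faster).

-- value[char_position] as a one-character Python string (total stand-in; Pre_ guarantees the index is in range, where Python would raise IndexError otherwise)
def pvKeyOf (char_position : Int) (value : String) : String :=
  match PySem.Str.pyGet? value char_position with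
  | some c => String.singleton c
  | none => ""

-- ===== PORT A =====
def generate_single_char_map_py (values : List String) (char_position : Int) : List (String × List String) :=
  (values.foldl
    (fun result_map value =>
      result_map.modify (pvKeyOf char_position value) [] (· ++ [value]))
    (PySem.Dict.empty : PySem.Dict String (List String))).items

-- ===== PORT B =====
def generate_single_char_map_py_alt (values : List String) (char_position : Int) : List (String × List String) :=
  let keys := PySem.List.dedup (values.map (pvKeyOf char_position))
  keys.map (fun k => (k, values.filter (fun value => pvKeyOf char_position value == k)))

-- ===== PRECONDITION & SPEC =====
-- Pre_ excludes exactly the inputs where Python raises IndexError: char_position out of range for some value.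
def Pre_generate_single_char_map_py (values : List String) (char_position : Int) : Prop :=
  ∀ value ∈ values, PySem.Raise.InRange value.toList.length char_position
instance (values : List String) (char_position : Int) : Decidable (Pre_generate_single_char_map_py values char_position) := by unfold Pre_generate_single_char_map_py; infer_instance
def pvWitness_generate_single_char_map_py : List String × Int := (["ab", "cd", "ax"], 0)

def Spec_generate_single_char_map_py (values : List String) (char_position : Int) (out : List (String × List String)) : Prop := out = generate_single_char_map_py_alt values char_position
instance (values : List String) (char_position : Int) (out : List (String × List String)) : Decidable (Spec_generate_single_char_map_py values char_position out) := by unfold Spec_generate_single_char_map_py; infer_instance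

-- ===== CLAIM (what is proved, stated in full; the proofs are below) =====
def Claim_equal_generate_single_char_map_py : Prop := ∀ (values : List String) (char_position : Int), Dom_generate_single_char_map_py values char_position → Pre_generate_single_char_map_py values char_position → Spec_generate_single_char_map_py values char_position (generate_single_char_map_py values char_position)

-- ===== LEMMAS AND PROOFS =====

-- A's grouping loop over values, re-expressed as the standard pair-grouping loop
theorem pvFold_pairs (values : List String) (char_position : Int)
    (d : PySem.Dict String (List String)) :
    values.foldl (fun m v => m.modify (pvKeyOf char_position v) [] (· ++ [v])) d
      = (values.map (fun v => (pvKeyOf char_position v, v))).foldl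
          (fun m p => m.modify p.1 [] (· ++ [p.2])) d := by
  induction values generalizing d with
  | nil => rfl
  | cons x xs ih => simp [List.foldl, ih]

-- ===== VERDICT (by name: the statement is the Claim_ definition above) =====
theorem generate_single_char_map_py_spec : Claim_equal_generate_single_char_map_py := by
  intro values char_position _ _
  unfold Spec_generate_single_char_map_py generate_single_char_map_py generate_single_char_map_py_alt
  have hnd : ((values.foldl (fun m v => m.modify (pvKeyOf char_position v) [] (· ++ [v]))
      (PySem.Dict.empty : PySem.Dict String (List String))).keys).Nodup := by
    exact PySem.Dict.nodup_keys_foldl_modify_key values (pvKeyOf char_position) [] _ _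
      PySem.Dict.nodup_keys_empty
  rw [PySem.Dict.items_eq_map_keys _ hnd []]
  have hkeys : (values.foldl (fun m v => m.modify (pvKeyOf char_position v) [] (· ++ [v]))
      (PySem.Dict.empty : PySem.Dict String (List String))).keys
      = PySem.List.dedup (values.map (pvKeyOf char_position)) := by
    rw [PySem.Dict.keys_foldl_modify_key]
    simp [PySem.Dict.keys_empty, PySem.Set.update_eq_append_filter, PySem.Set.contains]
  rw [hkeys]
  apply List.map_congr_left
  intro k _
  congr 1
  rw [pvFold_pairs, PySem.Dict.getD_foldl_modify_append]
  simp [PySem.Dict.getD_empty, List.filter_map, Function.comp_def]
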